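-- pv_equiv track=rewrite | github.com/gianass-first/Boston_BQ_Predictor | app_streamlit/streamlit_app.py | get_bq_standard
-- ===== SOURCE A (Python) =====
-- def get_bq_standard(age, gender):
--     """Devuelve el corte BQ oficial en segundos según edad y género."""
--     bq_table_m = [
--         (35, 10800), (40, 11100), (45, 11400), (50, 12000), (55, 12300),
--         (60, 12900), (65, 13800), (70, 14700), (75, 15600), (80, 16500),
--         (200, 17400),
--     ]
--     bq_table_f = [
--         (35, 12600), (40, 12900), (45, 13200), (50, 13800), (55, 14100),
--         (60, 14700), (65, 15600), (70, 16500), (75, 17400), (80, 18300),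
--         (200, 19200),
--     ]
--     table = bq_table_m if gender == 'M' else bq_table_f
--     for age_limit, standard in table:
--         if age < age_limit:
--             return standard
--     return table[-1][1]
-- ===== SOURCE B (Python) =====
-- import bisect
--
-- _BQ_M = [(35, 10800), (40, 11100), (45, 11400), (50, 12000), (55, 12300),
--          (60, 12900), (65, 13800), (70, 14700), (75, 15600), (80, 16500),
--          (200, 17400)]
-- _BQ_F = [(35, 12600), (40, 12900), (45, 13200), (50, 13800), (55, 14100),
--          (60, 14700), (65, 15600), (70, 16500), (75, 17400), (80, 18300),
--          (200, 19200)]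
--
-- def get_bq_standard(age, gender):
--     """Devuelve el corte BQ oficial en segundos segun edad y genero."""
--     table = _BQ_M if gender == 'M' else _BQ_F
--     thresholds = [t for t, _ in table]
--     standards = [s for _, s in table]
--     i = min(bisect.bisect_right(thresholds, age), len(standards) - 1)
--     return standards[i]
-- ===== Notes on version B (the rewrite author's own statement) =====
-- stated objective: idiomatic
-- what changed: Replaces the linear first-match scan over (limit, standard) pairs with module-level tables split into parallel threshold/standard lists and a bisect.bisect_right lookup clamped to the last entry.
import Mathlib
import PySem

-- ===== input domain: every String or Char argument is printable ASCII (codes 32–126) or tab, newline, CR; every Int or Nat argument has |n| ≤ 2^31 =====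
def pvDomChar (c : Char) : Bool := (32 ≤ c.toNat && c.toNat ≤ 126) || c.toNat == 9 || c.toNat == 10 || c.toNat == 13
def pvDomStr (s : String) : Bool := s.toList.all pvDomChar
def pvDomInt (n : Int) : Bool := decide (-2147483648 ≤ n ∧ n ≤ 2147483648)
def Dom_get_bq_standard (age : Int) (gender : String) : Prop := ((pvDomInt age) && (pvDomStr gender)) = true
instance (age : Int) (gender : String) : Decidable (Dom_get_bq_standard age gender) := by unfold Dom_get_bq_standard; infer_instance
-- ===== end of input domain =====

-- B: bisect_right on parallel threshold/standard lists instead of A's linear first-match scan (idiomatic; same result).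
-- ===== PORT A =====
-- first (age_limit, standard) with age < age_limit, else last standard
def pvScanA (age : Int) (last : Int) : List (Int × Int) → Int
  | [] => last
  | (lim, std) :: rest => if age < lim then std else pvScanA age last rest

def pvTableM : List (Int × Int) :=
  [(35, 10800), (40, 11100), (45, 11400), (50, 12000), (55, 12300),
   (60, 12900), (65, 13800), (70, 14700), (75, 15600), (80, 16500),
   (200, 17400)]
def pvTableF : List (Int × Int) :=
  [(35, 12600), (40, 12900), (45, 13200), (50, 13800), (55, 14100),
   (60, 14700), (65, 15600), (70, 16500), (75, 17400), (80, 18300),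
   (200, 19200)]

def get_bq_standard (age : Int) (gender : String) : Int :=
  let table := if gender == "M" then pvTableM else pvTableF
  pvScanA age ((table.getLastD (0, 0)).2) table

-- ===== PORT B =====
-- bisect.bisect_right on a sorted list = length of the prefix of elements ≤ age (stdlib call ported by its spec)
def pvBisectRight (xs : List Int) (age : Int) : Nat :=
  (xs.takeWhile (fun t => t ≤ age)).length

def get_bq_standard_alt (age : Int) (gender : String) : Int :=
  let table := if gender == "M" then pvTableM else pvTableF
  let thresholds := table.map Prod.fst
  let standards := table.map Prod.snd
  let i := min (pvBisectRight thresholds age) (standards.length - 1)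
  standards.getD i 0

-- ===== PRECONDITION & SPEC =====
def Spec_get_bq_standard (age : Int) (gender : String) (out : Int) : Prop := out = get_bq_standard_alt age gender
instance (age : Int) (gender : String) (out : Int) : Decidable (Spec_get_bq_standard age gender out) := by unfold Spec_get_bq_standard; infer_instance

-- ===== CLAIM (what is proved, stated in full; the proofs are below) =====
def Claim_equal_get_bq_standard : Prop := ∀ (age : Int) (gender : String), Dom_get_bq_standard age gender → Spec_get_bq_standard age gender (get_bq_standard age gender)

-- ===== LEMMAS AND PROOFS =====

-- ===== VERDICT (by name: the statement is the Claim_ definition above) =====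
lemma scan_eq_bisect (age : Int) :
    ∀ (tab : List (Int × Int)), tab ≠ [] →
    pvScanA age ((tab.getLastD (0, 0)).2) tab =
      (tab.map Prod.snd).getD
        (min (pvBisectRight (tab.map Prod.fst) age) ((tab.map Prod.snd).length - 1)) 0
  | [], h => absurd rfl h
  | (lim, std) :: rest, _ => by
    cases rest with
    | nil =>
      by_cases hl : age < lim <;>
        simp [pvScanA, pvBisectRight, List.takeWhile, hl, show ¬ lim ≤ age ↔ age < lim by omega,
          List.getD]
    | cons p rs =>
      by_cases hl : age < lim
      · have h2 : ¬ lim ≤ age := by omega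
        simp [pvScanA, pvBisectRight, hl, h2, List.getD]
      · have h2 : lim ≤ age := by omega
        have lhs_eq : pvScanA age ((((lim, std) :: p :: rs).getLastD (0, 0)).2)
            ((lim, std) :: p :: rs)
            = pvScanA age (((p :: rs).getLastD (0, 0)).2) (p :: rs) := by
          simp [pvScanA, hl, List.getLastD]
        rw [lhs_eq, scan_eq_bisect age (p :: rs) (by simp)]
        rw [show pvBisectRight (((lim, std) :: p :: rs).map Prod.fst) age
              = pvBisectRight ((p :: rs).map Prod.fst) age + 1 by
            simp [pvBisectRight, List.takeWhile_cons, h2]]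
        have hLle : pvBisectRight ((p :: rs).map Prod.fst) age ≤ rs.length + 1 := by
          have := (List.takeWhile_sublist (l := (p :: rs).map Prod.fst)
            (p := fun t => decide (t ≤ age))).length_le
          simpa [pvBisectRight] using this
        generalize pvBisectRight ((p :: rs).map Prod.fst) age = L at hLle ⊢
        simp only [List.map_cons, List.length_cons, List.length_map]
        rw [show min (L + 1) (rs.length + 1 + 1 - 1) = min L (rs.length + 1 - 1) + 1 by omega]
        simp [List.getD]

theorem get_bq_standard_spec : Claim_equal_get_bq_standard := by
  intro age gender _
  unfold Spec_get_bq_standard get_bq_standard get_bq_standard_alt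
  by_cases h : gender == "M" <;>
    simp only [h, if_true, Bool.false_eq_true, if_false] <;>
    [exact scan_eq_bisect age pvTableM (by simp [pvTableM]);
     exact scan_eq_bisect age pvTableF (by simp [pvTableF])]
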